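-- pv_equiv track=rewrite | github.com/BorjaPintos/transform | pngToBinary/pngToBinary.py | _cleanEndNulls
-- ===== SOURCE A (Python) =====
-- def _cleanEndNulls(byteArray):
--     totalIndex = len(byteArray)-1
--     for i in range(totalIndex,0, -1):
--         if byteArray[i] == 0:
--             del byteArray[i]
--         else:
--             break
--     return byteArray
-- ===== SOURCE B (Python) =====
-- def _cleanEndNulls(byteArray):
--     # One forward pass tracking the last non-zero index, then a single slice-delete.
--     lastNonZero = 0
--     for i in range(len(byteArray)):
--         if byteArray[i] != 0:
--             lastNonZero = i
--     del byteArray[lastNonZero + 1:]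
--     return byteArray
-- ===== Notes on version B (the rewrite author's own statement) =====
-- stated objective: alternative
-- what changed: Replaces A's backward walk with repeated end-deletions by one forward pass maintaining the last non-zero index followed by a single slice truncation.
import Mathlib
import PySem

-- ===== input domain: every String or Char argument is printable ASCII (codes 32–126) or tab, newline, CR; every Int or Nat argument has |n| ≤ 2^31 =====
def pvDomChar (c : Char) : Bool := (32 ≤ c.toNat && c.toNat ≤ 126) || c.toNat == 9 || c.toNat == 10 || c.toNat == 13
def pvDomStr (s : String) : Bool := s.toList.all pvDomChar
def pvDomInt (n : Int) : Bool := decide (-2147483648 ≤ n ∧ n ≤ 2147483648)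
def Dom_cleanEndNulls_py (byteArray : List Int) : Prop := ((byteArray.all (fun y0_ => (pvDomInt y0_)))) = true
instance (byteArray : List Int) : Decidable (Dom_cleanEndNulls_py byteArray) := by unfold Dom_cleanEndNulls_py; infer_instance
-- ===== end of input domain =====

-- B replaces A's backward walk with repeated end-deletions by one forward pass tracking the
-- last non-zero index plus a single truncation (alternative decomposition, same cost; both
-- Pythons truncate the list in place and return the same object).
-- ===== PORT A =====
-- Loop of A: for i in range(totalIndex, 0, -1): delete trailing zero or break.
-- 'del byteArray[i]' is reached only with 0 < i < len(byteArray) (pyGet? returned some),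
-- where it is exactly List.eraseIdx i.toNat.
def pvALoop (xs : List Int) (i : Int) : List Int :=
  if 0 < i then
    match PySem.List.pyGet? xs i with
    | some v => if v = 0 then pvALoop (xs.eraseIdx i.toNat) (i - 1) else xs
    | none => xs
  else xs
termination_by i.toNat
decreasing_by omega

def cleanEndNulls_py (byteArray : List Int) : List Int :=
  let totalIndex : Int := (byteArray.length : Int) - 1
  pvALoop byteArray totalIndex

-- ===== PORT B =====
-- B: one forward pass maintaining lastNonZero, then one truncation
-- ('del byteArray[lastNonZero+1:]' = take (lastNonZero+1)).
def cleanEndNulls_py_alt (byteArray : List Int) : List Int :=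
  let lastNonZero : Nat :=
    (List.range byteArray.length).foldl
      (fun (acc i : Nat) => if PySem.List.pyGetD byteArray (i : Int) 0 ≠ 0 then i else acc) 0
  byteArray.take (lastNonZero + 1)

-- ===== PRECONDITION & SPEC =====
def Spec_cleanEndNulls_py (byteArray : List Int) (out : List Int) : Prop := out = cleanEndNulls_py_alt byteArray
instance (byteArray : List Int) (out : List Int) : Decidable (Spec_cleanEndNulls_py byteArray out) := by unfold Spec_cleanEndNulls_py; infer_instance

-- ===== CLAIM (what is proved, stated in full; the proofs are below) =====
def Claim_equal_cleanEndNulls_py : Prop := ∀ (byteArray : List Int), Dom_cleanEndNulls_py byteArray → Spec_cleanEndNulls_py byteArray (cleanEndNulls_py byteArray)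

-- ===== LEMMAS AND PROOFS =====

-- Largest index j ≤ i with xs[j] ≠ 0, floored at 0 (the index both programs keep).
def lastNZ (xs : List Int) : Nat → Nat
  | 0 => 0
  | j + 1 => if xs.getD (j + 1) 0 ≠ 0 then j + 1 else lastNZ xs j

theorem aLoop_take (xs : List Int) : ∀ (i : Nat), i < xs.length →
    pvALoop (xs.take (i + 1)) (i : Int) = xs.take (lastNZ xs i + 1) := by
  intro i
  induction i with
  | zero => intro _; simp [pvALoop, lastNZ]
  | succ j ih =>
    intro hlt
    rw [pvALoop]
    have hpos : (0 : Int) < ((j + 1 : Nat) : Int) := by exact_mod_cast Nat.succ_pos j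
    have hget : PySem.List.pyGet? (xs.take (j + 2)) ((j + 1 : Nat) : Int)
        = some (xs.getD (j + 1) 0) := by
      rw [PySem.List.pyGet?_natCast]
      rw [List.getElem?_eq_getElem (by simp; omega)]
      simp [List.getElem_take, List.getD_eq_getElem?_getD, List.getElem?_eq_getElem hlt]
    simp only [hpos, if_pos, hget]
    have hsucc : lastNZ xs (j + 1) = if xs.getD (j + 1) 0 ≠ 0 then j + 1 else lastNZ xs j := rfl
    rcases eq_or_ne (xs.getD (j + 1) 0) 0 with hz | hz
    · have herase : (xs.take (j + 2)).eraseIdx (((j + 1 : Nat) : Int)).toNat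
          = xs.take (j + 1) := by
        rw [Int.toNat_natCast, List.eraseIdx_eq_take_drop_succ]
        rw [List.take_take, List.drop_eq_nil_of_le (by simp)]
        simp
      have hcast : ((j + 1 : Nat) : Int) - 1 = (j : Int) := by push_cast; ring
      rw [if_pos hz, herase, hcast, ih (by omega)]
      rw [hsucc, if_neg (not_not.mpr hz)]
    · rw [if_neg hz, hsucc, if_pos hz]

theorem fold_eq_lastNZ (xs : List Int) : ∀ (i : Nat), i < xs.length →
    (List.range (i + 1)).foldl (fun acc k => if xs.getD k 0 ≠ 0 then k else acc) 0
      = lastNZ xs i := by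
  intro i
  induction i with
  | zero => intro _; simp [List.range_succ, lastNZ]
  | succ j ih =>
    intro hlt
    rw [List.range_succ, List.foldl_append]
    rw [ih (by omega)]
    simp [lastNZ]


-- ===== VERDICT (by name: the statement is the Claim_ definition above) =====
theorem cleanEndNulls_py_spec : Claim_equal_cleanEndNulls_py := by
  intro xs _
  unfold Spec_cleanEndNulls_py cleanEndNulls_py cleanEndNulls_py_alt
  simp only [PySem.List.pyGetD_natCast]
  cases hxs : xs with
  | nil => simp [pvALoop]
  | cons y ys =>
    rw [← hxs]
    have hlen : xs.length = ys.length + 1 := by rw [hxs]; simp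
    rw [hlen]
    have hcast : ((ys.length + 1 : Nat) : Int) - 1 = (ys.length : Int) := by push_cast; ring
    rw [hcast]
    have h1 : xs.take (ys.length + 1) = xs := by rw [← hlen]; exact List.take_length
    have := aLoop_take xs ys.length (by omega)
    rw [h1] at this
    rw [this, fold_eq_lastNZ xs ys.length (by omega)]
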